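-- pv_equiv track=rewrite | github.com/napolitano-ambrogio/talon_app | db_adapter.py | _qmarks_to_named
-- ===== SOURCE A (Python) =====
-- def _qmarks_to_named(sql: str, params):
--     """
--     Converte i ? di SQLite in :p1, :p2... e costruisce un dict parametri.
--     Accetta tuple/list o dict (se passi già dict lascia tutto com’è).
--     """
--     if isinstance(params, dict):
--         return sql, params
--     if not params:
--         return sql, {}
--     out = {}
--     parts = sql.split('?')
--     new_sql = []
--     for i, part in enumerate(parts):
--         new_sql.append(part)
--         if i < len(parts) - 1:
--             key = f"p{i+1}"
--             new_sql.append(f":{key}")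
--             out[key] = params[i]
--     return ''.join(new_sql), out
-- ===== SOURCE B (Python) =====
-- def _qmarks_to_named(sql: str, params):
--     """Single left-to-right scan with a counter instead of split/join; the
--     params dict is built separately by a comprehension over range(count)."""
--     if isinstance(params, dict):
--         return sql, params
--     if not params:
--         return sql, {}
--     n = sql.count('?')
--     out = {f"p{i+1}": params[i] for i in range(n)}
--     res = []
--     k = 1
--     for ch in sql:
--         if ch == '?':
--             res.append(f":p{k}")
--             k += 1
--         else:
--             res.append(ch)
--     return ''.join(res), out
-- ===== Notes on version B (the rewrite author's own statement) =====
-- stated objective: alternative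
-- what changed: Replaces A's split-on-'?' plus interleaved rebuild/param fold with a single character scan carrying a counter for the SQL text, and builds the params dict independently by a comprehension over range(sql.count('?')); Pre_ excludes inputs where '?' placeholders outnumber params, on which both A and B raise IndexError.
import Mathlib
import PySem

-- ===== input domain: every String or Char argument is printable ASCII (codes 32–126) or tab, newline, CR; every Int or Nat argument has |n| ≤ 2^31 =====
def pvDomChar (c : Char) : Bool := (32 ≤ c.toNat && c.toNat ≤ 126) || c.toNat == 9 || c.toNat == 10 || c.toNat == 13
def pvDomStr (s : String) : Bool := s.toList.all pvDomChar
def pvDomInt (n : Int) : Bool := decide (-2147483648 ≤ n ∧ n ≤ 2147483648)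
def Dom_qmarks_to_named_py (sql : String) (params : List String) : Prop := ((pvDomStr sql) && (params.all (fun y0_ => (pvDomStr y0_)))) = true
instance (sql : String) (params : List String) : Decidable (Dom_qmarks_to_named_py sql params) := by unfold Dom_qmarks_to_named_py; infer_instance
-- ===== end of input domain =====

-- B replaces A's split-on-'?' + interleaved rebuild/param fold with one character scan carrying
-- a counter, building the params dict separately from range(count); objective: alternative (same cost).

-- ===== PORT A =====
def qmarks_to_named_py (sql : String) (params : List String) : String × (List (String × String)) :=
  if params = [] then (sql, [])
  else
    let parts : List String := (PySem.Str.split? sql "?").getD []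
    let st := (PySem.List.enumerate parts 0).foldl
      (fun (acc : List String × PySem.Dict String String) ip =>
        let newSql := acc.1 ++ [ip.2]
        if ip.1 < (parts.length : Int) - 1 then
          let key := "p" ++ PySem.Int.toStr (ip.1 + 1)
          (newSql ++ [":" ++ key], acc.2.insert key ((PySem.List.pyGet? params ip.1).getD ""))
        else (newSql, acc.2))
      ([], PySem.Dict.empty)
    (PySem.Str.join "" st.1, st.2.items)

-- ===== PORT B =====
def qmarks_to_named_py_alt (sql : String) (params : List String) : String × (List (String × String)) :=
  if params = [] then (sql, [])
  else
    let n := PySem.Str.count sql "?"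
    let out := (List.range n).foldl
      (fun (d : PySem.Dict String String) (i : Nat) =>
        d.insert ("p" ++ PySem.Int.toStr ((i : Int) + 1)) ((PySem.List.pyGet? params (i : Int)).getD ""))
      PySem.Dict.empty
    let st := sql.toList.foldl
      (fun (acc : List String × Int) ch =>
        if ch = '?' then (acc.1 ++ [":p" ++ PySem.Int.toStr acc.2], acc.2 + 1)
        else (acc.1 ++ [String.ofList [ch]], acc.2))
      ([], 1)
    (PySem.Str.join "" st.1, out.items)

-- ===== PRECONDITION & SPEC =====
-- Pre_ excludes exactly the inputs on which A raises IndexError: params non-empty but with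
-- fewer entries than there are '?' placeholders (params[i] is out of range); B raises there too.
def Pre_qmarks_to_named_py (sql : String) (params : List String) : Prop :=
  params = [] ∨ PySem.Str.count sql "?" ≤ params.length
instance (sql : String) (params : List String) : Decidable (Pre_qmarks_to_named_py sql params) := by unfold Pre_qmarks_to_named_py; infer_instance

def pvWitness_qmarks_to_named_py : String × List String := ("select * from t where a=? and b=?", ["1", "2"])

def Spec_qmarks_to_named_py (sql : String) (params : List String) (out : String × (List (String × String))) : Prop := out = qmarks_to_named_py_alt sql params
instance (sql : String) (params : List String) (out : String × (List (String × String))) : Decidable (Spec_qmarks_to_named_py sql params out) := by unfold Spec_qmarks_to_named_py; infer_instance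

-- ===== CLAIM (what is proved, stated in full; the proofs are below) =====
def Claim_equal_qmarks_to_named_py : Prop := ∀ (sql : String) (params : List String), Dom_qmarks_to_named_py sql params → Pre_qmarks_to_named_py sql params → Spec_qmarks_to_named_py sql params (qmarks_to_named_py sql params)

-- ===== LEMMAS AND PROOFS =====
-- (The ports agree on ALL inputs; Pre_ is carried because outside it both PYTHON programs raise.)

-- `splitOne c l` : what Python's l.split(c) computes for a one-character separator, structurally.
def splitOne (c : Char) : List Char → List (List Char)
  | [] => [[]]
  | d :: rest =>
    if d = c then [] :: splitOne c rest
    else match splitOne c rest with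
      | [] => [[d]]
      | p :: ps => (d :: p) :: ps

def consHead (x : List Char) : List (List Char) → List (List Char)
  | [] => [x]
  | p :: ps => (x ++ p) :: ps

theorem splitOne_ne_nil (c : Char) (l : List Char) : splitOne c l ≠ [] := by
  cases l with
  | nil => simp [splitOne]
  | cons d rest =>
    simp only [splitOne]
    split
    · simp
    · split <;> simp

theorem splitOn_go_one (c : Char) : ∀ (fuel : Nat) (l cur : List Char) (accs : List (List Char)),
    l.length ≤ fuel →
    PySem.Chars.splitOn.go [c] fuel l cur accs = accs.reverse ++ consHead cur.reverse (splitOne c l) := by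
  intro fuel
  induction fuel with
  | zero =>
    intro l cur accs h
    have : l = [] := by cases l <;> simp_all
    subst this
    simp [PySem.Chars.splitOn.go, splitOne, consHead]
  | succ n ih =>
    intro l cur accs h
    cases l with
    | nil => simp [PySem.Chars.splitOn.go, splitOne, consHead]
    | cons d rest =>
      rw [PySem.Chars.splitOn.go]
      by_cases hdc : d = c
      · subst hdc
        have hpre : [d].isPrefixOf (d :: rest) = true := by simp [List.isPrefixOf]
        simp only [hpre, if_true, List.length_cons, List.length_nil,
          List.drop_succ_cons, List.drop_zero, Nat.zero_add] at *
        rw [ih _ _ _ (by omega)]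
        simp [splitOne]
        cases h' : splitOne d rest with
        | nil => exact absurd h' (splitOne_ne_nil d rest)
        | cons p ps => simp [consHead]
      · have hpre : [c].isPrefixOf (d :: rest) = false := by
          simp [List.isPrefixOf]
          exact fun h => absurd h.symm hdc
        simp only [hpre, Bool.false_eq_true, if_false]
        rw [ih _ _ _ (by simp at h; omega)]
        simp only [splitOne, hdc, if_false]
        cases h' : splitOne c rest with
        | nil => exact absurd h' (splitOne_ne_nil c rest)
        | cons p ps => simp [consHead]

theorem splitOn_one (c : Char) (l : List Char) :
    PySem.Chars.splitOn l [c] = splitOne c l := by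
  rw [PySem.Chars.splitOn, splitOn_go_one c (l.length+1) l [] [] (by omega)]
  cases h' : splitOne c l with
  | nil => exact absurd h' (splitOne_ne_nil c l)
  | cons p ps => simp [consHead]

theorem count_go_one (c : Char) : ∀ (fuel : Nat) (l : List Char) (acc : Nat),
    l.length ≤ fuel →
    PySem.Chars.count.go [c] fuel l acc = acc + l.count c := by
  intro fuel
  induction fuel with
  | zero =>
    intro l acc h
    have : l = [] := by cases l <;> simp_all
    subst this
    simp [PySem.Chars.count.go]
  | succ n ih =>
    intro l acc h
    cases l with
    | nil => simp [PySem.Chars.count.go]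
    | cons d rest =>
      rw [PySem.Chars.count.go]
      by_cases hdc : c = d
      · subst hdc
        have hpre : [c].isPrefixOf (c :: rest) = true := by simp [List.isPrefixOf]
        simp only [hpre, if_true, List.length_cons, List.length_nil,
          List.drop_succ_cons, List.drop_zero, Nat.zero_add] at *
        rw [ih _ _ (by omega)]
        simp [List.count_cons]
        omega
      · have hpre : [c].isPrefixOf (d :: rest) = false := by
          simp [List.isPrefixOf]; exact fun h => absurd h hdc
        simp only [hpre, Bool.false_eq_true, if_false]
        rw [ih _ _ (by simp at h; omega)]
        simp [List.count_cons, hdc]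
        intro h'; exact absurd h'.symm hdc

theorem count_one (c : Char) (l : List Char) :
    PySem.Chars.count l [c] = l.count c := by
  rw [PySem.Chars.count]
  simp only [List.isEmpty_cons, Bool.false_eq_true, if_false]
  rw [count_go_one c l.length l 0 (le_refl _)]; omega

theorem length_splitOne (c : Char) (l : List Char) :
    (splitOne c l).length = l.count c + 1 := by
  induction l with
  | nil => simp [splitOne]
  | cons d rest ih =>
    simp only [splitOne]
    by_cases hdc : d = c
    · subst hdc; simp [ih]
    · simp only [hdc, if_false]
      cases h' : splitOne c rest with
      | nil => exact absurd h' (splitOne_ne_nil c rest)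
      | cons p ps =>
        rw [h'] at ih
        simp [List.count_cons, hdc] at *
        omega

-- the interleaving both programs produce, as a function of the split parts
def glue : List (List Char) → Int → List Char
  | [], _ => []
  | [p], _ => p
  | p :: q :: rest, k => p ++ (':' :: 'p' :: PySem.Int.toChars k) ++ glue (q :: rest) (k + 1)

-- B's scan output, as a function of the raw characters
def bstr : List Char → Int → List Char
  | [], _ => []
  | d :: rest, k =>
    if d = '?' then ':' :: 'p' :: PySem.Int.toChars k ++ bstr rest (k + 1)
    else d :: bstr rest k

theorem bstr_glue (l : List Char) : ∀ (k : Int), bstr l k = glue (splitOne '?' l) k := by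
  induction l with
  | nil => intro k; simp [bstr, splitOne, glue]
  | cons d rest ih =>
    intro k
    simp only [bstr, splitOne]
    by_cases hd : d = '?'
    · simp only [hd, if_true]
      rw [ih]
      cases h' : splitOne '?' rest with
      | nil => exact absurd h' (splitOne_ne_nil _ _)
      | cons p ps => simp [glue]
    · simp only [hd, if_false]
      rw [ih]
      cases h' : splitOne '?' rest with
      | nil => exact absurd h' (splitOne_ne_nil _ _)
      | cons p ps =>
        cases ps with
        | nil => simp [glue]
        | cons q t => simp [glue]

theorem join_nil_flatten (ps : List (List Char)) : PySem.Chars.join [] ps = ps.flatten := by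
  induction ps with
  | nil => simp [PySem.Chars.join_nil]
  | cons p rest ih =>
    cases rest with
    | nil => simp [PySem.Chars.join_singleton]
    | cons q t =>
      rw [PySem.Chars.join_cons_cons]
      simp [ih]

def keyOf (i : Nat) : String := "p" ++ PySem.Int.toStr ((i : Int) + 1)
def valOf (params : List String) (i : Nat) : String := (PySem.List.pyGet? params (i : Int)).getD ""

-- the params dict both programs build, as a simple recursion
def dfold (params : List String) (d : PySem.Dict String String) (s : Nat) : Nat → PySem.Dict String String
  | 0 => d
  | cnt + 1 => dfold params (d.insert (keyOf s) (valOf params s)) (s + 1) cnt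

theorem range_foldl_dfold (params : List String) :
    ∀ (cnt s : Nat) (d : PySem.Dict String String),
    (List.range cnt).foldl (fun d j => d.insert (keyOf (s + j)) (valOf params (s + j))) d
      = dfold params d s cnt := by
  intro cnt
  induction cnt with
  | zero => intro s d; simp [dfold]
  | succ n ih =>
    intro s d
    rw [List.range_succ_eq_map]
    simp only [List.foldl_cons, List.foldl_map, Nat.add_zero]
    rw [show (fun (d : PySem.Dict String String) (j : Nat) =>
        d.insert (keyOf (s + (j + 1))) (valOf params (s + (j + 1)))) =
      (fun d j => d.insert (keyOf ((s+1) + j)) (valOf params ((s+1) + j))) from by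
        funext d j; rw [show s + (j+1) = (s+1)+j by omega]]
    rw [ih]
    rfl

-- characterisation of B's scan fold
theorem b_fold_flat (l : List Char) : ∀ (frags : List String) (k : Int),
    (((l.foldl
      (fun (acc : List String × Int) ch =>
        if ch = '?' then (acc.1 ++ [":p" ++ PySem.Int.toStr acc.2], acc.2 + 1)
        else (acc.1 ++ [String.ofList [ch]], acc.2))
      (frags, k)).1).map String.toList).flatten
    = (frags.map String.toList).flatten ++ bstr l k := by
  induction l with
  | nil => intro frags k; simp [bstr]
  | cons d rest ih =>
    intro frags k
    simp only [List.foldl_cons]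
    by_cases hd : d = '?'
    · simp only [hd, if_true]
      rw [ih]
      simp [bstr, String.toList_append, PySem.Int.toList_toStr]
    · simp only [hd, if_false]
      rw [ih]
      simp [bstr, hd]

-- characterisation of A's fold over enumerate(parts)
theorem a_fold (params : List String) (L : Nat) :
    ∀ (ps : List String) (s : Nat) (frags : List String) (d : PySem.Dict String String),
    s + ps.length = L → ps ≠ [] →
    (((((PySem.List.enumerate ps (s : Int)).foldl
      (fun (acc : List String × PySem.Dict String String) ip =>
        let newSql := acc.1 ++ [ip.2]
        if ip.1 < (L : Int) - 1 then
          let key := "p" ++ PySem.Int.toStr (ip.1 + 1)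
          (newSql ++ [":" ++ key], acc.2.insert key ((PySem.List.pyGet? params ip.1).getD ""))
        else (newSql, acc.2))
      (frags, d)).1).map String.toList).flatten
        = (frags.map String.toList).flatten ++ glue (ps.map String.toList) ((s : Int) + 1))
    ∧ ((PySem.List.enumerate ps (s : Int)).foldl
      (fun (acc : List String × PySem.Dict String String) ip =>
        let newSql := acc.1 ++ [ip.2]
        if ip.1 < (L : Int) - 1 then
          let key := "p" ++ PySem.Int.toStr (ip.1 + 1)
          (newSql ++ [":" ++ key], acc.2.insert key ((PySem.List.pyGet? params ip.1).getD ""))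
        else (newSql, acc.2))
      (frags, d)).2 = dfold params d s (ps.length - 1) := by
  intro ps
  induction ps with
  | nil => intro s frags d h hne; exact absurd rfl hne
  | cons p rest ih =>
    intro s frags d h hne
    rw [PySem.List.enumerate_cons]
    cases rest with
    | nil =>
      have hs : ¬ ((s : Int) < (L : Int) - 1) := by simp at h; omega
      simp only [List.foldl_cons, hs, if_false, PySem.List.enumerate_nil, List.foldl_nil]
      constructor
      · simp [glue]
      · simp [dfold]
    | cons q t =>
      have hs : (s : Int) < (L : Int) - 1 := by simp at h ⊢; omega
      simp only [List.foldl_cons, hs, if_true]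
      have h' : (s+1) + (q :: t).length = L := by simp at h ⊢; omega
      have := ih (s+1)
        (frags ++ [p] ++ [":" ++ ("p" ++ PySem.Int.toStr ((s:Int) + 1))])
        (d.insert ("p" ++ PySem.Int.toStr ((s:Int) + 1)) ((PySem.List.pyGet? params (s:Int)).getD ""))
        h' (by simp)
      push_cast at this
      obtain ⟨h1, h2⟩ := this
      constructor
      · rw [h1]
        simp [glue, String.toList_append, PySem.Int.toList_toStr]
      · rw [h2]
        simp only [List.length_cons, Nat.add_sub_cancel]
        rfl

theorem ports_agree (sql : String) (params : List String) :
    qmarks_to_named_py sql params = qmarks_to_named_py_alt sql params := by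
  by_cases hp : params = []
  · simp [qmarks_to_named_py, qmarks_to_named_py_alt, hp]
  · unfold qmarks_to_named_py qmarks_to_named_py_alt
    simp only [hp, if_false]
    have hq : ("?" : String).toList = ['?'] := by decide
    have hparts : (PySem.Str.split? sql "?").getD [] = (splitOne '?' sql.toList).map String.ofList := by
      rw [PySem.Str.split?, PySem.Chars.split?.eq_1]
      simp [hq, splitOn_one]
    have hcount : PySem.Str.count sql "?" = sql.toList.count '?' := by
      rw [PySem.Str.count_eq, hq, count_one]
    set l := sql.toList with hl
    have hLen : ((PySem.Str.split? sql "?").getD []).length = l.count '?' + 1 := by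
      rw [hparts]; simp [length_splitOne]
    have hne : ((PySem.Str.split? sql "?").getD []) ≠ [] := by
      rw [hparts]; intro h
      exact splitOne_ne_nil '?' l (by simpa using h)
    have haf := a_fold params (((PySem.Str.split? sql "?").getD []).length)
      ((PySem.Str.split? sql "?").getD []) 0 [] PySem.Dict.empty (by omega) hne
    push_cast at haf
    obtain ⟨ha1, ha2⟩ := haf
    have hbf := b_fold_flat l [] 1
    refine Prod.ext ?_ ?_
    · apply String.toList_inj.mp
      rw [PySem.Str.toList_join, PySem.Str.toList_join]
      have hsep : ("" : String).toList = [] := by decide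
      rw [hsep, join_nil_flatten, join_nil_flatten]
      rw [ha1, hbf]
      simp only [List.map_nil, List.flatten_nil, List.nil_append]
      rw [hparts, List.map_map]
      have : (String.toList ∘ String.ofList) = id := by funext x; simp
      rw [this, List.map_id, bstr_glue]
    · simp only []
      rw [ha2, hLen, Nat.add_sub_cancel, hcount]
      congr 1
      rw [show (fun (d : PySem.Dict String String) (i : Nat) =>
            d.insert ("p" ++ PySem.Int.toStr ((i : Int) + 1)) ((PySem.List.pyGet? params (i : Int)).getD "")) =
          (fun d j => d.insert (keyOf (0 + j)) (valOf params (0 + j))) from by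
            funext d j; simp [keyOf, valOf]]
      rw [range_foldl_dfold]

-- ===== VERDICT (by name: the statement is the Claim_ definition above) =====
theorem qmarks_to_named_py_spec : Claim_equal_qmarks_to_named_py := by
  intro sql params _ _
  unfold Spec_qmarks_to_named_py
  exact ports_agree sql params
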